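-- pv_equiv track=rewrite | github.com/QPaddock/Rubik | moves.py | valid_mix
-- ===== SOURCE A (Python) =====
-- def valid_mix(mix):
--     for twist in mix.split():
--         if (twist != 'R' and twist != "R'" and twist != 'L' and twist != "L'"
--                 and twist != 'F' and twist != "F'"
--                 and twist != 'B' and twist != "B'" and twist != 'U'
--                 and twist != "U'" and twist != 'D' and twist != "D'"
--                 and twist != "R2" and twist != "L2" and twist != "F2"
--                 and twist != "B2" and twist != "U2" and twist != "D2"):
--             return False
--
--     return True
-- ===== SOURCE B (Python) =====
-- def valid_mix(mix):
--     for t in mix.split():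
--         if t[0] not in "RLFBUD" or t[1:] not in ("", "'", "2"):
--             return False
--     return True
-- ===== Notes on version B (the rewrite author's own statement) =====
-- stated objective: simpler
-- what changed: Instead of comparing each token against the 18 enumerated move literals, B validates the token structurally: its first character must be one of the six face letters and the rest of the token must be empty, a prime, or a half-turn digit.
import Mathlib
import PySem

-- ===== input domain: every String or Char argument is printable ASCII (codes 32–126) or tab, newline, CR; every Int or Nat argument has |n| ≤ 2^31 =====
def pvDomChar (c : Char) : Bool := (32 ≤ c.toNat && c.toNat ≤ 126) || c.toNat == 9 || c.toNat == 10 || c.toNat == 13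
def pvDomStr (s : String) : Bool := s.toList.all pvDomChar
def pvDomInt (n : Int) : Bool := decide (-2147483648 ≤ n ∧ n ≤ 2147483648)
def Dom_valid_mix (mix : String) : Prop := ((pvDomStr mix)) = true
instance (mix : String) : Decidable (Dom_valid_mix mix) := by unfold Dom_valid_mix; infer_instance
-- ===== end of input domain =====

-- B validates each token structurally (face letter plus optional prime or half-turn suffix)
-- instead of comparing it against the 18 enumerated move literals; objective: simpler.

-- ===== PORT A =====
-- the chained negated equalities of A's if-condition, as one Bool
def pvTwistBad (t : String) : Bool :=
  !(t == "R") && !(t == "R'") && !(t == "L") && !(t == "L'")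
  && !(t == "F") && !(t == "F'")
  && !(t == "B") && !(t == "B'") && !(t == "U")
  && !(t == "U'") && !(t == "D") && !(t == "D'")
  && !(t == "R2") && !(t == "L2") && !(t == "F2")
  && !(t == "B2") && !(t == "U2") && !(t == "D2")

-- A's for-loop with early `return False`
def pvLoopA : List String → Bool
  | [] => true
  | t :: rest => if pvTwistBad t then false else pvLoopA rest

def valid_mix (mix : String) : Bool := pvLoopA (PySem.Str.split₀ mix)

-- ===== PORT B =====
-- token check: t[0] in "RLFBUD" and t[1:] in ("", "'", "2")
def pvTokOk (t : String) : Bool :=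
  (match PySem.List.pyGet? t.toList 0 with
   | some c => ("RLFBUD".toList).contains c
   | none => false)  -- t[0] would raise IndexError on an empty token; unreachable: split() yields only non-empty tokens
  &&
  (let suf := PySem.List.slice t.toList (some 1) none
   suf == ([] : List Char) || suf == ['\''] || suf == ['2'])

def valid_mix_alt (mix : String) : Bool := (PySem.Str.split₀ mix).all pvTokOk

-- ===== PRECONDITION & SPEC =====
def Spec_valid_mix (mix : String) (out : Bool) : Prop := out = valid_mix_alt mix
instance (mix : String) (out : Bool) : Decidable (Spec_valid_mix mix out) := by unfold Spec_valid_mix; infer_instance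

-- ===== CLAIM (what is proved, stated in full; the proofs are below) =====
def Claim_equal_valid_mix : Prop := ∀ (mix : String), Dom_valid_mix mix → Spec_valid_mix mix (valid_mix mix)

-- ===== LEMMAS AND PROOFS =====

-- string equality via the underlying character lists
theorem pvBeq_toList (s r : String) : (s == r) = (s.toList == r.toList) := by
  simp [String.ext_iff]

-- per-token agreement: failing A's 18-literal membership test = failing B's structural check
theorem pvTok_eq (t : String) : pvTwistBad t = !pvTokOk t := by
  rw [← String.ofList_toList (s := t)]
  generalize t.toList = l
  match l with
  | [] => decide
  | [a] =>
      simp [pvTwistBad, pvTokOk, PySem.List.pyGet?, PySem.List.pyIdx?, PySem.List.slice,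
        pvBeq_toList]
      rw [Bool.eq_iff_iff]
      simp
      tauto
  | [a, b] =>
      simp [pvTwistBad, pvTokOk, PySem.List.pyGet?, PySem.List.pyIdx?, PySem.List.slice,
        pvBeq_toList]
      rw [Bool.eq_iff_iff]
      simp
      by_cases h1 : b = '\'' <;> by_cases h2 : b = '2' <;> simp_all <;> tauto
  | a :: b :: c :: rest =>
      simp [pvTwistBad, pvTokOk, PySem.List.pyGet?, PySem.List.pyIdx?, PySem.List.slice,
        pvBeq_toList]

-- A's early-return loop is B's List.all over the same tokens
theorem pvLoop_eq (ts : List String) : pvLoopA ts = ts.all pvTokOk := by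
  induction ts with
  | nil => rfl
  | cons t rest ih =>
      simp only [pvLoopA, List.all_cons, pvTok_eq t, ih]
      by_cases h : pvTokOk t = true <;> simp [h]

-- ===== VERDICT (by name: the statement is the Claim_ definition above) =====
theorem valid_mix_spec : Claim_equal_valid_mix := by
  intro mix _
  unfold Spec_valid_mix valid_mix valid_mix_alt
  exact pvLoop_eq _
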